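-- pv_equiv track=rewrite | github.com/darren-stokes/gta-fiveM | cars_sql.py | manufacturer_count
-- ===== SOURCE A (Python) =====
-- def manufacturer_count(manufacturer_list):
--     # Create a dictionary to hold our values
--     manufacturer_count = {}
--     for maker in sorted(manufacturer_list):
--         # If Make isn't in the dictionary, add it
--         if maker not in manufacturer_count:
--             manufacturer_count[maker] = 1
--         # Make is already there, increment
--         else:
--             count = manufacturer_count[maker]
--             count+=1
--             manufacturer_count[maker] = count
--     return manufacturer_count
-- ===== SOURCE B (Python) =====
-- def manufacturer_count(manufacturer_list):
--     # Divide and conquer: recursively count each half into a key-sorted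
--     # (make, count) run list and merge the two lists, adding counts of equal
--     # keys; no sort of the input and no tallying dict.
--     def merge(xs, ys):
--         out = []
--         i = j = 0
--         while i < len(xs) and j < len(ys):
--             if xs[i][0] < ys[j][0]:
--                 out.append(xs[i]); i += 1
--             elif ys[j][0] < xs[i][0]:
--                 out.append(ys[j]); j += 1
--             else:
--                 out.append((xs[i][0], xs[i][1] + ys[j][1])); i += 1; j += 1
--         out.extend(xs[i:])
--         out.extend(ys[j:])
--         return out
--
--     def count_sorted(lst):
--         if len(lst) <= 1:
--             return [(lst[0], 1)] if lst else []
--         mid = len(lst) // 2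
--         return merge(count_sorted(lst[:mid]), count_sorted(lst[mid:]))
--
--     return dict(count_sorted(manufacturer_list))
-- ===== Notes on version B (the rewrite author's own statement) =====
-- stated objective: alternative
-- what changed: B counts by divide and conquer: each half of the list is recursively turned into a key-sorted (make, count) run list and the two lists are merged, adding counts of equal keys, instead of A's sort of the whole input followed by a membership-checked dict counting loop.
import Mathlib
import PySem

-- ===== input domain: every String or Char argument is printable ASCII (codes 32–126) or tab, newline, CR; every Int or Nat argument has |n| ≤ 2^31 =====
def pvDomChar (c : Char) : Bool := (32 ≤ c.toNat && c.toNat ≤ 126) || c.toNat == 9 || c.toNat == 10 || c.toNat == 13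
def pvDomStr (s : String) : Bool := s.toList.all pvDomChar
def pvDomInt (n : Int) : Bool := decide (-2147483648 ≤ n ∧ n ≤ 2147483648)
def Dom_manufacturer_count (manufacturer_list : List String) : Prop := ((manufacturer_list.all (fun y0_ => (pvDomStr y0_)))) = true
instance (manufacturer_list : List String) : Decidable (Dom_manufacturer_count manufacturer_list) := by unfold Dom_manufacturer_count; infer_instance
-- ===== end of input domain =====

-- B replaces A's sort-then-count dict loop by divide-and-conquer: count each half recursively and merge the key-sorted run lists; return values proved equal.


-- ===== PORT A =====
-- sorted(manufacturer_list) loop: if maker not in dict insert 1, else read count, add 1, store back.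
-- 'manufacturer_count[maker]' in the else-branch is guarded by 'maker in manufacturer_count', so getD 0 is exact.
def manufacturer_count (manufacturer_list : List String) : List (String × Int) :=
  ((PySem.List.sorted manufacturer_list (fun x => x) false).foldl
    (fun d maker =>
      if d.contains maker = false then d.insert maker 1
      else
        let count := d.getD maker 0
        d.insert maker (count + 1))
    PySem.Dict.empty).items

-- ===== PORT B =====
-- Source B's merge: the two-pointer while-loop consuming xs[i]/ys[j]; advancing an
-- index is consuming the head here, and out.extend of the remainders is the
-- [] cases (exact: same comparisons in the same order, same emitted pairs).
def mcMerge : List (String × Int) → List (String × Int) → List (String × Int)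
  | [], ys => ys
  | x :: t1, [] => x :: t1
  | x :: t1, y :: t2 =>
    if x.1 < y.1 then x :: mcMerge t1 (y :: t2)
    else if y.1 < x.1 then y :: mcMerge (x :: t1) t2
    else (x.1, x.2 + y.2) :: mcMerge t1 t2
termination_by xs ys => xs.length + ys.length

-- termination facts for count_sorted's two recursive calls
lemma mcCount_take_lt {lst : List String} (h : ¬ lst.length ≤ 1) :
    (lst.take (lst.length / 2)).length < lst.length := by
  simp [List.length_take]; omega

lemma mcCount_drop_lt {lst : List String} (h : ¬ lst.length ≤ 1) :
    (lst.drop (lst.length / 2)).length < lst.length := by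
  simp [List.length_drop]; omega

-- Source B's count_sorted: base case len(lst) <= 1, else merge the halves
-- (lst[:mid] / lst[mid:] with 0 ≤ mid ≤ len are exactly take/drop).
def mcCount (lst : List String) : List (String × Int) :=
  if _h : lst.length ≤ 1 then
    match lst with
    | [] => []
    | x :: _ => [(x, 1)]
  else
    let mid := lst.length / 2
    mcMerge (mcCount (lst.take mid)) (mcCount (lst.drop mid))
termination_by lst.length
decreasing_by
  · exact mcCount_take_lt _h
  · exact mcCount_drop_lt _h

-- dict(pairs): the run list has distinct keys, so insertion order is the list order.
def manufacturer_count_alt (manufacturer_list : List String) : List (String × Int) :=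
  (PySem.Dict.ofList (mcCount manufacturer_list)).items

-- ===== PRECONDITION & SPEC =====
def Spec_manufacturer_count (manufacturer_list : List String) (out : List (String × Int)) : Prop := out = manufacturer_count_alt manufacturer_list
instance (manufacturer_list : List String) (out : List (String × Int)) : Decidable (Spec_manufacturer_count manufacturer_list out) := by unfold Spec_manufacturer_count; infer_instance

-- ===== CLAIM (what is proved, stated in full; the proofs are below) =====
def Claim_equal_manufacturer_count : Prop := ∀ (manufacturer_list : List String), Dom_manufacturer_count manufacturer_list → Spec_manufacturer_count manufacturer_list (manufacturer_count manufacturer_list)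

-- ===== LEMMAS AND PROOFS =====

-- the common normal form both programs compute: distinct keys in ascending order, each with its count.
def mcCanon (l : List String) : List (String × Int) :=
  (PySem.List.sorted (PySem.Set.ofList l) (fun x => x) false).map (fun k => (k, (l.count k : Int)))

-- ps is THE strictly-key-increasing positive run list of the multiplicity function f.
def ReprF (f : String → Int) (ps : List (String × Int)) : Prop :=
  (ps.map Prod.fst).Pairwise (· < ·) ∧
  (∀ p ∈ ps, p.2 = f p.1) ∧
  (∀ k, f k ≠ 0 → k ∈ ps.map Prod.fst) ∧
  (∀ p ∈ ps, 0 < p.2)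

lemma reprF_congr {f g : String → Int} {ps : List (String × Int)}
    (hfg : ∀ k, f k = g k) (h : ReprF f ps) : ReprF g ps := by
  obtain ⟨h1, h2, h3, h4⟩ := h
  exact ⟨h1, fun p hp => (h2 p hp).trans (hfg p.1), fun k hk => h3 k (by rw [hfg]; exact hk), h4⟩

lemma reprF_nil_zero {f : String → Int} (h : ReprF f []) : ∀ k, f k = 0 := by
  intro k
  by_contra hk
  simpa using h.2.2.1 k hk

lemma reprF_tail {f : String → Int} {x : String × Int} {t : List (String × Int)}
    (h : ReprF f (x :: t)) : ReprF (fun k => if k = x.1 then 0 else f k) t := by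
  obtain ⟨h1, h2, h3, h4⟩ := h
  rw [List.map_cons] at h1
  refine ⟨(List.pairwise_cons.1 h1).2, ?_, ?_, fun p hp => h4 p (List.mem_cons_of_mem _ hp)⟩
  · intro p hp
    have hlt : x.1 < p.1 := (List.pairwise_cons.1 h1).1 p.1 (List.mem_map_of_mem hp)
    show p.2 = if p.1 = x.1 then 0 else f p.1
    rw [if_neg (Ne.symm (ne_of_lt hlt))]
    exact h2 p (List.mem_cons_of_mem _ hp)
  · intro k hk
    by_cases hkx : k = x.1
    · simp [hkx] at hk
    · have := h3 k (by simpa [hkx] using hk)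
      simpa [hkx] using this

lemma reprF_mem_keys_lt {f : String → Int} {x : String × Int} {t : List (String × Int)}
    (h : ReprF f (x :: t)) : ∀ k ∈ t.map Prod.fst, x.1 < k := by
  intro k hk
  have h1 := h.1
  rw [List.map_cons] at h1
  exact (List.pairwise_cons.1 h1).1 k hk

-- keys of a merge are exactly the union of the keys.
lemma mem_keys_mcMerge : ∀ (ps qs : List (String × Int)) (k : String),
    k ∈ (mcMerge ps qs).map Prod.fst ↔ k ∈ ps.map Prod.fst ∨ k ∈ qs.map Prod.fst := by
  intro ps qs k
  fun_induction mcMerge ps qs with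
  | case1 ys => simp
  | case2 x t1 => simp
  | case3 x t1 y t2 hlt ih => simp [ih]; tauto
  | case4 x t1 y t2 hlt hgt ih => simp [ih]; tauto
  | case5 x t1 y t2 hlt hgt ih =>
      have hk : x.1 = y.1 := le_antisymm (le_of_not_gt hgt) (le_of_not_gt hlt)
      simp [ih, hk]; tauto

-- merging run lists adds the multiplicity functions.
lemma mcMerge_reprF : ∀ (ps qs : List (String × Int)) (f g : String → Int),
    ReprF f ps → ReprF g qs → ReprF (fun k => f k + g k) (mcMerge ps qs) := by
  intro ps qs
  fun_induction mcMerge ps qs with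
  | case1 ys =>
      intro f g hf hg
      refine reprF_congr (fun k => ?_) hg
      rw [reprF_nil_zero hf k, zero_add]
  | case2 x t1 =>
      intro f g hf hg
      refine reprF_congr (fun k => ?_) hf
      rw [reprF_nil_zero hg k, add_zero]
  | case3 x t1 y t2 hlt ih =>
      intro f g hf hg
      have hmt := ih (fun k => if k = x.1 then 0 else f k) g (reprF_tail hf) hg
      have hkeys : ∀ k ∈ (mcMerge t1 (y :: t2)).map Prod.fst, x.1 < k := by
        intro k hk
        rcases (mem_keys_mcMerge _ _ _).1 hk with h1 | h2
        · exact reprF_mem_keys_lt hf k h1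
        · rw [List.map_cons] at h2
          rcases List.mem_cons.1 h2 with rfl | h3
          · exact hlt
          · exact lt_trans hlt (reprF_mem_keys_lt hg k h3)
      have hgx : g x.1 = 0 := by
        by_contra hgg
        have hmem := hg.2.2.1 x.1 hgg
        rw [List.map_cons] at hmem
        rcases List.mem_cons.1 hmem with heq | hmem'
        · exact absurd heq (ne_of_lt hlt)
        · exact absurd (reprF_mem_keys_lt hg x.1 hmem') (lt_asymm hlt)
      refine ⟨?_, ?_, ?_, ?_⟩
      · rw [List.map_cons, List.pairwise_cons]
        exact ⟨hkeys, hmt.1⟩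
      · intro p hp
        rcases List.mem_cons.1 hp with rfl | hp'
        · show p.2 = f p.1 + g p.1
          rw [hgx, add_zero]
          exact hf.2.1 p (List.mem_cons_self ..)
        · have hval := hmt.2.1 p hp'
          have hne : p.1 ≠ x.1 := ne_of_gt (hkeys p.1 (List.mem_map_of_mem hp'))
          show p.2 = f p.1 + g p.1
          rw [hval]
          simp [hne]
      · intro k hk
        rw [List.map_cons]
        by_cases hkx : k = x.1
        · exact hkx ▸ List.mem_cons_self ..
        · refine List.mem_cons_of_mem _ (hmt.2.2.1 k ?_)
          simpa [hkx] using hk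
      · intro p hp
        rcases List.mem_cons.1 hp with rfl | hp'
        · exact hf.2.2.2 p (List.mem_cons_self ..)
        · exact hmt.2.2.2 p hp'
  | case4 x t1 y t2 hlt hgt ih =>
      intro f g hf hg
      have hmt := ih f (fun k => if k = y.1 then 0 else g k) hf (reprF_tail hg)
      have hkeys : ∀ k ∈ (mcMerge (x :: t1) t2).map Prod.fst, y.1 < k := by
        intro k hk
        rcases (mem_keys_mcMerge _ _ _).1 hk with h1 | h2
        · rw [List.map_cons] at h1
          rcases List.mem_cons.1 h1 with rfl | h3
          · exact hgt
          · exact lt_trans hgt (reprF_mem_keys_lt hf k h3)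
        · exact reprF_mem_keys_lt hg k h2
      have hfy : f y.1 = 0 := by
        by_contra hff
        have hmem := hf.2.2.1 y.1 hff
        rw [List.map_cons] at hmem
        rcases List.mem_cons.1 hmem with heq | hmem'
        · exact absurd heq (ne_of_lt hgt)
        · exact absurd (reprF_mem_keys_lt hf y.1 hmem') (lt_asymm hgt)
      refine ⟨?_, ?_, ?_, ?_⟩
      · rw [List.map_cons, List.pairwise_cons]
        exact ⟨hkeys, hmt.1⟩
      · intro p hp
        rcases List.mem_cons.1 hp with rfl | hp'
        · show p.2 = f p.1 + g p.1
          rw [hfy, zero_add]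
          exact hg.2.1 p (List.mem_cons_self ..)
        · have hval := hmt.2.1 p hp'
          have hne : p.1 ≠ y.1 := ne_of_gt (hkeys p.1 (List.mem_map_of_mem hp'))
          show p.2 = f p.1 + g p.1
          rw [hval]
          simp [hne]
      · intro k hk
        rw [List.map_cons]
        by_cases hky : k = y.1
        · exact hky ▸ List.mem_cons_self ..
        · refine List.mem_cons_of_mem _ (hmt.2.2.1 k ?_)
          simpa [hky] using hk
      · intro p hp
        rcases List.mem_cons.1 hp with rfl | hp'
        · exact hg.2.2.2 p (List.mem_cons_self ..)
        · exact hmt.2.2.2 p hp'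
  | case5 x t1 y t2 hlt hgt ih =>
      intro f g hf hg
      have hk : x.1 = y.1 := le_antisymm (le_of_not_gt hgt) (le_of_not_gt hlt)
      have hgt2 : ReprF (fun k => if k = x.1 then 0 else g k) t2 := by
        rw [hk]
        exact reprF_tail hg
      have hmt := ih (fun k => if k = x.1 then 0 else f k) (fun k => if k = x.1 then 0 else g k)
        (reprF_tail hf) hgt2
      have hkeys : ∀ k ∈ (mcMerge t1 t2).map Prod.fst, x.1 < k := by
        intro k hkm
        rcases (mem_keys_mcMerge _ _ _).1 hkm with h1 | h2
        · exact reprF_mem_keys_lt hf k h1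
        · exact hk ▸ reprF_mem_keys_lt hg k h2
      refine ⟨?_, ?_, ?_, ?_⟩
      · rw [List.map_cons, List.pairwise_cons]
        exact ⟨hkeys, hmt.1⟩
      · intro p hp
        rcases List.mem_cons.1 hp with rfl | hp'
        · show x.2 + y.2 = f x.1 + g x.1
          rw [hf.2.1 x (List.mem_cons_self ..), hg.2.1 y (List.mem_cons_self ..), hk]
        · have hval := hmt.2.1 p hp'
          have hne : p.1 ≠ x.1 := ne_of_gt (hkeys p.1 (List.mem_map_of_mem hp'))
          show p.2 = f p.1 + g p.1
          rw [hval]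
          simp [hne]
      · intro k hkk
        rw [List.map_cons]
        by_cases hkx : k = x.1
        · exact hkx ▸ List.mem_cons_self ..
        · refine List.mem_cons_of_mem _ (hmt.2.2.1 k ?_)
          simpa [hkx] using hkk
      · intro p hp
        rcases List.mem_cons.1 hp with rfl | hp'
        · have h1 := hf.2.2.2 x (List.mem_cons_self ..)
          have h2 := hg.2.2.2 y (List.mem_cons_self ..)
          show (0 : Int) < x.2 + y.2
          omega
        · exact hmt.2.2.2 p hp'

-- a multiplicity function has at most one run list.
lemma reprF_unique : ∀ (ps qs : List (String × Int)) (f : String → Int),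
    ReprF f ps → ReprF f qs → ps = qs := by
  intro ps
  induction ps with
  | nil =>
      intro qs f hp hq
      cases qs with
      | nil => rfl
      | cons y t2 =>
          have h0 : f y.1 = 0 := reprF_nil_zero hp y.1
          have hy := hq.2.1 y (List.mem_cons_self ..)
          have hpos := hq.2.2.2 y (List.mem_cons_self ..)
          rw [hy, h0] at hpos
          exact absurd hpos (lt_irrefl 0)
  | cons x t1 ih =>
      intro qs f hp hq
      cases qs with
      | nil =>
          have h0 : f x.1 = 0 := reprF_nil_zero hq x.1
          have hx := hp.2.1 x (List.mem_cons_self ..)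
          have hpos := hp.2.2.2 x (List.mem_cons_self ..)
          rw [hx, h0] at hpos
          exact absurd hpos (lt_irrefl 0)
      | cons y t2 =>
          have hx2 := hp.2.1 x (List.mem_cons_self ..)
          have hxpos := hp.2.2.2 x (List.mem_cons_self ..)
          have hfx : f x.1 ≠ 0 := by rw [← hx2]; exact ne_of_gt hxpos
          have hy2 := hq.2.1 y (List.mem_cons_self ..)
          have hypos := hq.2.2.2 y (List.mem_cons_self ..)
          have hfy : f y.1 ≠ 0 := by rw [← hy2]; exact ne_of_gt hypos
          have hxq := hq.2.2.1 x.1 hfx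
          rw [List.map_cons] at hxq
          have hyp := hp.2.2.1 y.1 hfy
          rw [List.map_cons] at hyp
          have hkey : x.1 = y.1 := by
            rcases List.mem_cons.1 hxq with h | h
            · exact h
            · rcases List.mem_cons.1 hyp with h' | h'
              · exact h'.symm
              · exact absurd (lt_trans (reprF_mem_keys_lt hp y.1 h') (reprF_mem_keys_lt hq x.1 h))
                  (lt_irrefl x.1)
          have hval : x.2 = y.2 := by rw [hx2, hy2, hkey]
          have hxy : x = y := Prod.ext hkey hval
          rw [hxy]
          congr 1
          refine ih t2 (fun k => if k = y.1 then 0 else f k) ?_ (reprF_tail hq)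
          rw [← hkey]
          exact reprF_tail hp

lemma mcCanon_keys (l : List String) :
    (mcCanon l).map Prod.fst = PySem.List.sorted (PySem.Set.ofList l) (fun x => x) false := by
  rw [mcCanon, List.map_map]
  have h : ∀ ks : List String, List.map (Prod.fst ∘ fun k => (k, (l.count k : Int))) ks = ks := by
    intro ks
    induction ks with
    | nil => rfl
    | cons a t ih => simpa using ih
  exact h _

lemma mcCanon_reprF (l : List String) : ReprF (fun k => (l.count k : Int)) (mcCanon l) := by
  refine ⟨?_, ?_, ?_, ?_⟩
  · rw [mcCanon_keys]
    exact PySem.List.sorted_ofList_pairwise_lt (xs := l)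
  · intro p hp
    obtain ⟨k, _, rfl⟩ := List.mem_map.1 hp
    rfl
  · intro k hk
    rw [mcCanon_keys, PySem.List.mem_sorted]
    refine (PySem.Set.mem_ofList _ _).2 ?_
    have hk' : (l.count k : Int) ≠ 0 := hk
    have h0 : l.count k ≠ 0 := by exact_mod_cast hk'
    exact List.count_pos_iff.1 (Nat.pos_of_ne_zero h0)
  · intro p hp
    obtain ⟨k, hk, rfl⟩ := List.mem_map.1 hp
    have hkl : k ∈ l := by
      rw [PySem.List.mem_sorted] at hk
      exact (PySem.Set.mem_ofList _ _).1 hk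
    show (0 : Int) < (l.count k : Int)
    exact_mod_cast List.count_pos_iff.2 hkl

lemma mcCount_eq_canon : ∀ (n : Nat) (l : List String), l.length ≤ n → mcCount l = mcCanon l
  | 0, l, hlen => by
      have : l = [] := List.length_eq_zero_iff.1 (Nat.le_zero.1 hlen)
      subst this
      rw [mcCount]
      have hs : (PySem.List.sorted ([] : List String) (fun x => x) false) = [] := rfl
      simp [mcCanon, hs]
  | n + 1, l, hlen => by
      rw [mcCount]
      by_cases h : l.length ≤ 1
      · rw [dif_pos h]
        match l, h with
        | [], _ =>
            have hs : (PySem.List.sorted ([] : List String) (fun x => x) false) = [] := rfl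
            simp [mcCanon, hs]
        | [x], _ =>
            have hs1 : PySem.List.sorted (PySem.Set.ofList [x]) (fun x => x) false = [x] := rfl
            simp [mcCanon, hs1]
      · rw [dif_neg h]
        show mcMerge (mcCount (l.take (l.length / 2))) (mcCount (l.drop (l.length / 2))) = mcCanon l
        have h1 : (l.take (l.length / 2)).length ≤ n := by
          have := mcCount_take_lt (lst := l) h
          omega
        have h2 : (l.drop (l.length / 2)).length ≤ n := by
          have := mcCount_drop_lt (lst := l) h
          omega
        rw [mcCount_eq_canon n _ h1, mcCount_eq_canon n _ h2]
        have hm := mcMerge_reprF _ _ _ _ (mcCanon_reprF (l.take (l.length / 2)))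
          (mcCanon_reprF (l.drop (l.length / 2)))
        have hc : ∀ k, ((l.take (l.length / 2)).count k : Int) + ((l.drop (l.length / 2)).count k : Int)
            = (l.count k : Int) := by
          intro k
          conv_rhs => rw [← List.take_append_drop (l.length / 2) l]
          rw [List.count_append]
          push_cast
          ring
        exact reprF_unique _ _ _ (reprF_congr hc hm) (mcCanon_reprF l)

-- ===== A-side lemmas (unchanged characterisation of A's counting loop) =====

-- A's loop body is the standard getD-and-increment step.
lemma stepA_eq :
    (fun (d : PySem.Dict String Int) maker =>
      if d.contains maker = false then d.insert maker 1
      else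
        let count := d.getD maker 0
        d.insert maker (count + 1))
    = (fun (d : PySem.Dict String Int) x => d.insert x (d.getD x 0 + 1)) := by
  funext d x
  by_cases h : d.contains x = false
  · simp [h, PySem.Dict.getD_of_not_contains]
  · simp [h]

-- set(xs) is a sublist of xs (first occurrences, in order).
lemma foldl_add_sublist : ∀ (xs s : List String), (xs.foldl PySem.Set.add s).Sublist (s ++ xs)
  | [], s => by simp
  | x :: xs, s => by
    have h := foldl_add_sublist xs (PySem.Set.add s x)
    refine List.Sublist.trans h ?_
    by_cases hc : x ∈ s
    · have ha : PySem.Set.add s x = s := by simp [PySem.Set.add, hc]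
      rw [ha]
      exact List.Sublist.append_left (List.sublist_cons_self x xs) s
    · have ha : PySem.Set.add s x = s ++ [x] := by simp [PySem.Set.add, hc]
      rw [ha, List.append_assoc, List.singleton_append]

lemma ofList_sublist (xs : List String) : (PySem.Set.ofList xs).Sublist xs := by
  have := foldl_add_sublist xs []
  simpa [PySem.Set.ofList_eq_foldl] using this

-- dedup of a sorted list is strictly increasing.
lemma ofList_sorted_pairwise_lt (xs : List String) :
    (PySem.Set.ofList (PySem.List.sorted xs (fun x => x) false)).Pairwise (· < ·) := by
  have hle : (PySem.Set.ofList (PySem.List.sorted xs (fun x => x) false)).Pairwise (· ≤ ·) := by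
    have hs := PySem.List.sorted_pairwise (xs := xs) (key := fun x => x) (κ := String)
    exact hs.sublist (ofList_sublist _)
  have hne : (PySem.Set.ofList (PySem.List.sorted xs (fun x => x) false)).Pairwise (· ≠ ·) :=
    PySem.Set.nodup_ofList _
  exact (hle.and hne).imp (fun h => lt_of_le_of_ne h.1 h.2)

-- sorting the distinct keys = deduping the sorted list.
lemma sorted_set_comm (xs : List String) :
    PySem.List.sorted (PySem.Set.ofList xs) (fun x => x) false
      = PySem.Set.ofList (PySem.List.sorted xs (fun x => x) false) := by
  apply PySem.List.sorted_eq_of_perm_of_pairwise_lt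
  · refine (List.perm_ext_iff_of_nodup (PySem.Set.nodup_ofList _) (PySem.Set.nodup_ofList _)).2 ?_
    intro a
    simp [PySem.Set.mem_ofList, PySem.List.mem_sorted]
  · exact ofList_sorted_pairwise_lt xs

-- B returns the canonical run list.
lemma alt_eq_canon (l : List String) : manufacturer_count_alt l = mcCanon l := by
  unfold manufacturer_count_alt
  rw [mcCount_eq_canon l.length l le_rfl]
  have hnd : ((mcCanon l).map Prod.fst).Nodup := by
    rw [mcCanon_keys]
    exact (PySem.List.sorted_ofList_pairwise_lt (xs := l)).imp ne_of_lt
  have hofl : PySem.Dict.ofList (mcCanon l)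
      = (mcCanon l).foldl (fun d p => d.insert p.1 p.2) PySem.Dict.empty := rfl
  rw [hofl, PySem.Dict.items_foldl_insert_fresh _ _ _ _ (fun a _ => rfl) hnd]
  rw [show (PySem.Dict.empty : PySem.Dict String Int).items = [] from rfl, List.nil_append]
  simp

-- ===== VERDICT (by name: the statement is the Claim_ definition above) =====
theorem manufacturer_count_spec : Claim_equal_manufacturer_count := by
  intro xs _
  show manufacturer_count xs = manufacturer_count_alt xs
  rw [alt_eq_canon]
  unfold manufacturer_count mcCanon
  rw [stepA_eq, PySem.Dict.foldl_insert_getD_add_one_eq_counter, PySem.Dict.items_counter,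
    sorted_set_comm]
  refine List.map_congr_left fun k _ => ?_
  have hperm : (PySem.List.sorted xs (fun x => x) false).Perm xs := PySem.List.sorted_perm _ _ _
  simp [hperm.count_eq]
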